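-- pv_equiv track=rewrite | github.com/omarjso/Personal-Website | problems/scripts/Add_to_prb_page.py | sort_modules
-- ===== SOURCE A (Python) =====
-- def sort_modules(list_of_modules):
--     dict_of_modules = {}
--     for i in range(0, len(list_of_modules)):
--         dict_of_modules[list_of_modules[i][0]] = list_of_modules[i][1]
--     final_content = ""
--     for i in range(1, 651):
--         if i in dict_of_modules:
--             final_content += dict_of_modules[i]
--     return final_content
-- ===== SOURCE B (Python) =====
-- def sort_modules(list_of_modules):
--     dict_of_modules = dict(list_of_modules)
--     items = sorted(dict_of_modules.items(), key=lambda kv: kv[0])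
--     return "".join(v for k, v in items if 1 <= k <= 650)
-- ===== Notes on version B (the rewrite author's own statement) =====
-- stated objective: alternative
-- what changed: Replaces A's fixed membership scan over the constant range 1..650 with sort-the-present-keys, filter to the 1..650 range, and a single join of the values.
import Mathlib
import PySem

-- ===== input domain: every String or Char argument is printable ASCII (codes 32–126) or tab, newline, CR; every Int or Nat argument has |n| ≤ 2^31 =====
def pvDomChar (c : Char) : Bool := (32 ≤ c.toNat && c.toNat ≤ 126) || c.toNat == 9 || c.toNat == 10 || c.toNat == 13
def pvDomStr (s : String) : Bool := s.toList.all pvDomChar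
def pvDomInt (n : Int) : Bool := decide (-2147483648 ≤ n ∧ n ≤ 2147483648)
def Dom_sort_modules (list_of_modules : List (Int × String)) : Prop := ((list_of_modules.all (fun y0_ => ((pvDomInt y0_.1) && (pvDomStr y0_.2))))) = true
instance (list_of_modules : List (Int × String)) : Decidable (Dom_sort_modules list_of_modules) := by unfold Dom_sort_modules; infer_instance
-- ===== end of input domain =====

-- B replaces A's fixed membership scan over 1..650 with sort-present-keys, filter to 1..650, join (alternative decomposition, not claimed faster).


-- ===== PORT A =====
-- final_content is accumulated as List Char (PySem's string representation); '+=' is '++' there.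
def sort_modules (list_of_modules : List (Int × String)) : String :=
  let dict_of_modules :=
    (PySem.List.pyRange 0 (PySem.List.len list_of_modules)).foldl
      (fun d i => d.insert (PySem.List.pyGetD list_of_modules i (0, "")).1
                           (PySem.List.pyGetD list_of_modules i (0, "")).2)
      PySem.Dict.empty
  String.ofList
    ((PySem.List.pyRange 1 651).foldl
      (fun acc i => if dict_of_modules.contains i
                    then acc ++ (dict_of_modules.getD i "").toList
                    else acc) [])

-- ===== PORT B =====
def sort_modules_alt (list_of_modules : List (Int × String)) : String :=
  let dict_of_modules := list_of_modules.foldl (fun d p => d.insert p.1 p.2) PySem.Dict.empty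
  let items := PySem.List.sorted dict_of_modules.items (fun kv => kv.1)
  PySem.Str.join ""
    ((items.filter (fun kv => decide (1 ≤ kv.1 ∧ kv.1 ≤ 650))).map (fun kv => kv.2))

-- ===== PRECONDITION & SPEC =====
def Spec_sort_modules (list_of_modules : List (Int × String)) (out : String) : Prop := out = sort_modules_alt list_of_modules
instance (list_of_modules : List (Int × String)) (out : String) : Decidable (Spec_sort_modules list_of_modules out) := by unfold Spec_sort_modules; infer_instance

-- ===== CLAIM (what is proved, stated in full; the proofs are below) =====
def Claim_equal_sort_modules : Prop := ∀ (list_of_modules : List (Int × String)), Dom_sort_modules list_of_modules → Spec_sort_modules list_of_modules (sort_modules list_of_modules)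

-- ===== LEMMAS AND PROOFS =====

-- 'if p(x): out += g(x)' over a loop collects the filtered, mapped chunks.
lemma foldl_append_if_list {α : Type} (p : α → Bool) (g : α → List Char) (l : List α)
    (acc : List Char) :
    l.foldl (fun acc x => if p x then acc ++ g x else acc) acc
      = acc ++ ((l.filter p).map g).flatten := by
  induction l generalizing acc with
  | nil => simp
  | cons x t ih =>
    by_cases hx : p x = true <;> simp [hx, ih, List.append_assoc]

-- ''.join on the List Char side is flatten.
lemma chars_join_nil_eq_flatten (css : List (List Char)) :
    PySem.Chars.join [] css = css.flatten := by
  show List.intercalate [] css = css.flatten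
  induction css with
  | nil => rfl
  | cons c t ih =>
    cases t with
    | nil => simp [List.intercalate]
    | cons d u =>
      simp only [List.intercalate, List.intersperse] at *
      simp_all

-- The pairs A's 1..650 scan visits, in order, are exactly B's sorted-and-filtered items.
lemma pairs_eq (d : PySem.Dict Int String) (h : d.keys.Nodup) :
    ((PySem.List.pyRange 1 651).filter (fun i => d.contains i)).map (fun i => (i, d.getD i ""))
      = (PySem.List.sorted d.items (fun kv => kv.1)).filter
          (fun kv => decide (1 ≤ kv.1 ∧ kv.1 ≤ 650)) := by
  have hitems : d.items.Nodup := List.Nodup.of_map _ h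
  have hsnodup : (PySem.List.sorted d.items (fun kv => kv.1)).Nodup :=
    ((PySem.List.sorted_perm d.items (fun kv => kv.1) false).nodup_iff).mpr hitems
  have hskeys : ((PySem.List.sorted d.items (fun kv => kv.1)).map Prod.fst).Nodup :=
    (((PySem.List.sorted_perm d.items (fun kv => kv.1) false).map Prod.fst).nodup_iff).mpr h
  apply List.Perm.eq_of_pairwise (le := fun a b => a.1 < b.1)
  · intro a b _ _ h1 h2; exact absurd (lt_trans h1 h2) (lt_irrefl _)
  · exact List.pairwise_map.mpr
      ((PySem.List.pairwise_lt_pyRange_one 1 651).filter _)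
  · have hle := PySem.List.sorted_pairwise d.items (fun kv => kv.1)
    have hne : (PySem.List.sorted d.items (fun kv => kv.1)).Pairwise
        (fun a b => a.1 ≠ b.1) := List.pairwise_map.mp hskeys
    exact ((hle.and hne).imp (fun hab => lt_of_le_of_ne hab.1 hab.2)).filter _
  · apply (List.perm_ext_iff_of_nodup ?_ (hsnodup.filter _)).mpr
    · intro p
      constructor
      · intro hp
        rcases List.mem_map.mp hp with ⟨i, hi, rfl⟩
        rcases List.mem_filter.mp hi with ⟨hir, hic⟩
        rcases (PySem.List.mem_pyRange_one).mp hir with ⟨h1, h2⟩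
        rcases List.mem_map.mp ((PySem.Dict.contains_iff_mem_keys d i).mp hic) with ⟨q, hq, hqi⟩
        have hv : d.getD i "" = q.2 := by
          subst hqi; exact PySem.Dict.getD_of_mem_items d hq h ""
        refine List.mem_filter.mpr ⟨(PySem.List.mem_sorted _ _ _ _).mpr ?_, by
          simp; omega⟩
        have : (i, d.getD i "") = q := by
          rw [hv, ← hqi]
        rw [this]; exact hq
      · intro hp
        rcases List.mem_filter.mp hp with ⟨hps, hpb⟩
        have hpi : p ∈ d.items := (PySem.List.mem_sorted _ _ _ _).mp hps
        have hb : 1 ≤ p.1 ∧ p.1 ≤ 650 := by simpa using hpb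
        have hcon : d.contains p.1 = true :=
          (PySem.Dict.contains_iff_mem_keys d p.1).mpr
            (List.mem_map.mpr ⟨p, hpi, rfl⟩)
        refine List.mem_map.mpr ⟨p.1, List.mem_filter.mpr
          ⟨(PySem.List.mem_pyRange_one).mpr ⟨hb.1, by omega⟩, hcon⟩, ?_⟩
        have hv : d.getD p.1 "" = p.2 := PySem.Dict.getD_of_mem_items d (by exact hpi) h ""
        rw [hv]
    · exact ((PySem.List.nodup_pyRange_one 1 651).filter _).map
        (fun a b hab => congrArg Prod.fst hab)

-- A's range scan equals B's join, for any dict with distinct keys.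
lemma scan_eq_join (d : PySem.Dict Int String) (h : d.keys.Nodup) :
    String.ofList ((PySem.List.pyRange 1 651).foldl
      (fun acc i => if d.contains i then acc ++ (d.getD i "").toList else acc) [])
    = PySem.Str.join ""
        (((PySem.List.sorted d.items (fun kv => kv.1)).filter
          (fun kv => decide (1 ≤ kv.1 ∧ kv.1 ≤ 650))).map (fun kv => kv.2)) := by
  rw [foldl_append_if_list (fun i => d.contains i) (fun i => (d.getD i "").toList)]
  show _ = String.ofList (PySem.Chars.join "".toList _)
  rw [show ("" : String).toList = [] from rfl, chars_join_nil_eq_flatten]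
  apply congrArg String.ofList
  rw [List.nil_append, ← pairs_eq d h, List.map_map, List.map_map]
  rfl

theorem ports_agree (l : List (Int × String)) : sort_modules l = sort_modules_alt l := by
  unfold sort_modules sort_modules_alt
  rw [PySem.List.foldl_pyRange_zero_pyGetD l ((0 : Int), ("" : String))
        (fun d p => d.insert p.1 p.2) PySem.Dict.empty]
  exact scan_eq_join _
    (PySem.Dict.nodup_keys_foldl_insert_key l Prod.fst (fun _ p => p.2) _
      PySem.Dict.nodup_keys_empty)

-- ===== VERDICT (by name: the statement is the Claim_ definition above) =====
theorem sort_modules_spec : Claim_equal_sort_modules := by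
  intro l _
  exact ports_agree l
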